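-- pv_equiv track=rewrite | github.com/Big-Theta/EulerProblems | bintools/backup/bintools.py | binprint
-- ===== SOURCE A (Python) =====
-- def binprint(binval):
--     retval = ""
--     n = len(binval)
--     for i in range(n):
--         j = n-i-1
--         retval = binval[j] + retval;
--         if i % 4 == 3:
--             retval = ' ' + retval;
--     return retval
-- ===== SOURCE B (Python) =====
-- def binprint(binval):
--     n = len(binval)
--     r = n % 4
--     return binval[:r] + ''.join(' ' + binval[i:i+4] for i in range(r, n, 4))
-- ===== Notes on version B (the rewrite author's own statement) =====
-- stated objective: faster
-- what changed: Replaces the character-by-character right-to-left string-prepend loop with slicing: the length-mod-4 remainder prefix followed by a join of space-prefixed 4-character slices.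
import Mathlib
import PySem

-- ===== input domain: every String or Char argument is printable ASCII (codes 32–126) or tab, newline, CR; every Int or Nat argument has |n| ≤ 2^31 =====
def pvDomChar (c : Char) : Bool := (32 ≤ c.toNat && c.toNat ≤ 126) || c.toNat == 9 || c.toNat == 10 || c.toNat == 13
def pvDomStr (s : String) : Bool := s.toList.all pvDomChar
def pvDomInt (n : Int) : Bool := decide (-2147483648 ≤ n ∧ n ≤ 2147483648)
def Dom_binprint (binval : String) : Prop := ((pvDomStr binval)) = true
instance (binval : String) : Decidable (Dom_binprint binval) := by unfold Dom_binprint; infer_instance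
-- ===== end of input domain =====

-- B replaces A's quadratic character-by-character right-to-left prepend loop by slicing:
-- the length-mod-4 remainder prefix followed by a join of space-prefixed 4-character slices.

-- ===== PORT A =====
-- the loop 'for i in range(n): j = n-i-1; retval = binval[j] + retval; if i % 4 == 3: retval = " " + retval'
-- (binval[j] always has j in range here, so pyGetD's default is never used)
def binprintLoop (cs : List Char) : List Char :=
  (PySem.List.pyRange 0 (cs.length : Int) 1).foldl (fun retval i =>
    let j : Int := (cs.length : Int) - i - 1
    let retval' := PySem.List.pyGetD cs j ' ' :: retval
    if PySem.Int.mod i 4 == 3 then ' ' :: retval' else retval') []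

def binprint (binval : String) : String := String.ofList (binprintLoop binval.toList)

-- ===== PORT B =====
-- binval[:r] + ''.join(' ' + binval[i:i+4] for i in range(r, n, 4))  with r = n % 4
def binprintChunks (cs : List Char) : List Char :=
  let n : Int := (cs.length : Int)
  let r : Int := PySem.Int.mod n 4
  PySem.List.slice cs none (some r) ++
    PySem.Chars.join []
      ((PySem.List.pyRange r n 4).map (fun i => ' ' :: PySem.List.slice cs (some i) (some (i + 4))))

def binprint_alt (binval : String) : String := String.ofList (binprintChunks binval.toList)

-- ===== PRECONDITION & SPEC =====
def Spec_binprint (binval : String) (out : String) : Prop := out = binprint_alt binval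
instance (binval : String) (out : String) : Decidable (Spec_binprint binval out) := by unfold Spec_binprint; infer_instance

-- ===== CLAIM (what is proved, stated in full; the proofs are below) =====
def Claim_equal_binprint : Prop := ∀ (binval : String), Dom_binprint binval → Spec_binprint binval (binprint binval)

-- ===== LEMMAS AND PROOFS =====

-- ''.join is concatenation
lemma join_empty_eq_flatten (l : List (List Char)) : PySem.Chars.join [] l = l.flatten := by
  induction l with
  | nil => simp [PySem.Chars.join_nil]
  | cons a l ih =>
    cases l with
    | nil => simp [PySem.Chars.join_singleton]
    | cons b m => simp [PySem.Chars.join_cons_cons] at *; simp [ih]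

lemma pyGetD_cons_of_one_le (c : Char) (t : List Char) {j : Int} (d : Char) (hj : 1 ≤ j) :
    PySem.List.pyGetD (c :: t) j d = PySem.List.pyGetD t (j - 1) d := by
  rw [PySem.List.pyGetD_of_nonneg _ _ (by omega), PySem.List.pyGetD_of_nonneg _ _ (by omega)]
  have : j.toNat = (j-1).toNat + 1 := by omega
  rw [this]
  simp

-- B's port with indices and counts rewritten as Nat arithmetic
lemma chunks_norm (cs : List Char) :
    binprintChunks cs = cs.take (cs.length % 4) ++
      ((List.range (cs.length / 4)).map
        (fun k => ' ' :: (cs.drop (cs.length % 4 + 4 * k)).take 4)).flatten := by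
  simp only [binprintChunks]
  have hmod : PySem.Int.mod (cs.length : Int) 4 = ((cs.length % 4 : Nat) : Int) := by
    exact_mod_cast PySem.Int.mod_natCast cs.length 4
  rw [hmod, PySem.List.slice_to _ (by positivity), PySem.List.pyRange_of_pos _ _ (by norm_num)]
  rw [join_empty_eq_flatten]
  simp only [List.map_map, Int.toNat_natCast]
  have hK : (if ((cs.length % 4 : Nat) : Int) < (cs.length : Int) then
      (((cs.length : Int) - ((cs.length % 4 : Nat) : Int) + 4 - 1) / 4).toNat else 0) = cs.length / 4 := by
    split_ifs with h
    · have h4 : ((cs.length : Int) - ((cs.length % 4 : Nat) : Int) + 4 - 1) = ((cs.length - cs.length % 4 + 3 : Nat) : Int) := by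
        push_cast; omega
      rw [h4]
      omega
    · omega
  rw [hK]
  congr 1
  congr 1
  apply List.map_congr_left
  intro k hk
  simp only [Function.comp]
  have h1 : ((cs.length % 4 : Nat) : Int) + 4 * (k : Int) = ((cs.length % 4 + 4 * k : Nat) : Int) := by push_cast; ring
  rw [h1]
  have h2 : ((cs.length % 4 + 4 * k : Nat) : Int) + 4 = ((cs.length % 4 + 4 * k + 4 : Nat) : Int) := by push_cast; ring
  rw [h2, PySem.List.slice_natCast]
  have : cs.length % 4 + 4 * k + 4 - (cs.length % 4 + 4 * k) = 4 := by omega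
  rw [this]

-- peeling the first character off B: a space appears exactly when the new length is a multiple of 4
lemma chunks_cons (c : Char) (t : List Char) :
    binprintChunks (c :: t) =
      (if (t.length + 1) % 4 = 0 then [' '] else []) ++ c :: binprintChunks t := by
  rw [chunks_norm, chunks_norm]
  simp only [List.length_cons]
  by_cases h : (t.length + 1) % 4 = 0
  · have hm : t.length % 4 = 3 := by omega
    have hd : (t.length + 1) / 4 = t.length / 4 + 1 := by omega
    rw [h, hd, hm, List.range_succ_eq_map]
    simp only [List.map_cons, List.map_map, List.flatten_cons]
    simp only [Nat.mul_zero, Nat.add_zero, List.drop_zero, List.take_zero, List.nil_append]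
    have he : ∀ k, ((fun k => ' ' :: List.take 4 (List.drop (0 + 4 * k) (c :: t))) ∘ (· + 1)) k
        = (fun k => ' ' :: List.take 4 (List.drop (3 + 4 * k) t)) k := by
      intro k
      simp only [Function.comp]
      have : 0 + 4 * (k + 1) = (3 + 4 * k) + 1 := by omega
      rw [this, List.drop_succ_cons]
    rw [List.map_congr_left (fun k _ => he k)]
    simp
  · have hr : (t.length + 1) % 4 = t.length % 4 + 1 := by omega
    have hd : (t.length + 1) / 4 = t.length / 4 := by omega
    rw [if_neg h, hr, hd, List.take_succ_cons]
    have he : ∀ k, (fun k => ' ' :: List.take 4 (List.drop (t.length % 4 + 1 + 4 * k) (c :: t))) k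
        = (fun k => ' ' :: List.take 4 (List.drop (t.length % 4 + 4 * k) t)) k := by
      intro k
      have : t.length % 4 + 1 + 4 * k = (t.length % 4 + 4 * k) + 1 := by omega
      simp only [this, List.drop_succ_cons]
    rw [List.map_congr_left (fun k _ => he k)]
    simp

-- peeling the first character off A (it is consumed by the LAST loop iteration)
lemma loop_cons (c : Char) (t : List Char) :
    binprintLoop (c :: t) =
      (if (t.length + 1) % 4 = 0 then [' '] else []) ++ c :: binprintLoop t := by
  simp only [binprintLoop, List.length_cons]
  have hn : ((t.length + 1 : Nat) : Int) = (t.length : Int) + 1 := by push_cast; ring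
  rw [hn, PySem.List.pyRange_one_succ_right (by positivity), List.foldl_append]
  have hfold :
      (PySem.List.pyRange 0 (t.length : Int)).foldl (fun retval i =>
        let j : Int := (t.length : Int) + 1 - i - 1
        let retval' := PySem.List.pyGetD (c :: t) j ' ' :: retval
        if PySem.Int.mod i 4 == 3 then ' ' :: retval' else retval') [] =
      (PySem.List.pyRange 0 (t.length : Int)).foldl (fun retval i =>
        let j : Int := (t.length : Int) - i - 1
        let retval' := PySem.List.pyGetD t j ' ' :: retval
        if PySem.Int.mod i 4 == 3 then ' ' :: retval' else retval') [] := by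
    apply PySem.List.foldl_congr_mem
    intro acc x hx
    rw [PySem.List.mem_pyRange_one] at hx
    simp only []
    rw [pyGetD_cons_of_one_le c t ' ' (by omega)]
    have : (t.length : Int) + 1 - x - 1 - 1 = (t.length : Int) - x - 1 := by ring
    rw [this]
  rw [hfold]
  simp only [List.foldl_cons, List.foldl_nil]
  have hj0 : (t.length : Int) + 1 - (t.length : Int) - 1 = 0 := by ring
  rw [hj0, PySem.List.pyGetD_of_nonneg _ _ (by omega)]
  simp only [Int.toNat_zero, List.getD_cons_zero]
  have hmod : PySem.Int.mod (t.length : Int) 4 = ((t.length % 4 : Nat) : Int) := by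
    exact_mod_cast PySem.Int.mod_natCast t.length 4
  rw [hmod]
  by_cases h : (t.length + 1) % 4 = 0
  · have h3 : t.length % 4 = 3 := by omega
    rw [h3]
    simp [h]
  · simp [h]
    omega

lemma loop_eq_chunks (cs : List Char) : binprintLoop cs = binprintChunks cs := by
  induction cs with
  | nil => rfl
  | cons c t ih => rw [loop_cons, chunks_cons, ih]

-- ===== VERDICT (by name: the statement is the Claim_ definition above) =====
theorem binprint_spec : Claim_equal_binprint := by
  intro binval _
  show binprint binval = binprint_alt binval
  unfold binprint binprint_alt
  rw [loop_eq_chunks]
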